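-- pv_equiv track=rewrite | github.com/adam-on-the-internet/dsm-webscrape | util/plaintext_util.py | remove_page_markings
-- ===== SOURCE A (Python) =====
-- def remove_page_markings(dirty_lines):
--     clean_lines = []
--     just_removed_page_break = False
--
--     for index, line in enumerate(dirty_lines):
--
--         # After removing each PAGE BREAK, we need to also remove the actual Page Number from the document.
--         if just_removed_page_break:
--
--             if line.strip() == "":
--                 continue
--
--             elif line.strip() != "":
--                 just_removed_page_break = False
--
--                 # If we're at the DOCUMENT END, we don't have a page number to remove.
--                 if "---- DOCUMENT END ----" in line.strip():
--                     clean_lines.append(line)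
--
--                 continue
--
--         # We need to remove each PAGE BREAK
--         if "---- PAGE BREAK ----" in line.strip():
--             just_removed_page_break = True
--             continue
--
--         clean_lines.append(line)
--
--     return clean_lines
-- ===== SOURCE B (Python) =====
-- def remove_page_markings(dirty_lines):
--     clean_lines = []
--     i = 0
--     n = len(dirty_lines)
--     while i < n:
--         line = dirty_lines[i]
--         if "---- PAGE BREAK ----" in line.strip():
--             i += 1
--             # skip the blank region after the break
--             while i < n and dirty_lines[i].strip() == "":
--                 i += 1
--             # consume the single page-number line (kept only if it is the document end)
--             if i < n:
--                 if "---- DOCUMENT END ----" in dirty_lines[i].strip():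
--                     clean_lines.append(dirty_lines[i])
--                 i += 1
--         else:
--             clean_lines.append(line)
--             i += 1
--     return clean_lines
-- ===== Notes on version B (the rewrite author's own statement) =====
-- stated objective: alternative
-- what changed: Replaced the boolean just_removed_page_break state machine by an explicit index cursor with a nested while-loop that consumes the blank region and the one page-number line after each page break.
import Mathlib
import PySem

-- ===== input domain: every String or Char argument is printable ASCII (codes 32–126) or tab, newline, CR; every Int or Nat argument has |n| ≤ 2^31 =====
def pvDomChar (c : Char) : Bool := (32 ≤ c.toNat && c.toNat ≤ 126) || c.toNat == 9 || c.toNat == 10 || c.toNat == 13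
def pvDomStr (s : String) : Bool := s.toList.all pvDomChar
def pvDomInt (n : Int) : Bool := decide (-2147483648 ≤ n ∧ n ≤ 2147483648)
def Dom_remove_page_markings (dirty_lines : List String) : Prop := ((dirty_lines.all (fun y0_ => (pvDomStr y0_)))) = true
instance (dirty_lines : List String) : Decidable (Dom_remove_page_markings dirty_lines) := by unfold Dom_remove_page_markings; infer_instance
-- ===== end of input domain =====

-- B replaces A's boolean state machine with an index cursor and a nested blank-skipping loop (objective: alternative decomposition).

-- ===== PORT A =====
-- line.strip() contains "---- PAGE BREAK ----"
def pvIsBreak (l : String) : Bool := PySem.Str.isIn "---- PAGE BREAK ----" (PySem.Str.strip l)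
-- line.strip() contains "---- DOCUMENT END ----"
def pvIsDocEnd (l : String) : Bool := PySem.Str.isIn "---- DOCUMENT END ----" (PySem.Str.strip l)
-- line.strip() == ""
def pvIsBlank (l : String) : Bool := PySem.Str.strip l = ""

-- A's for-loop over (line, just_removed_page_break, clean_lines), branch for branch
def pvAuxA : List String → Bool → List String → List String
  | [], _, acc => acc
  | l :: ls, flag, acc =>
    if flag then
      if pvIsBlank l then pvAuxA ls true acc
      else if pvIsDocEnd l then pvAuxA ls false (acc ++ [l])
      else pvAuxA ls false acc
    else if pvIsBreak l then pvAuxA ls true acc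
    else pvAuxA ls false (acc ++ [l])

def remove_page_markings (dirty_lines : List String) : List String :=
  pvAuxA dirty_lines false []

-- ===== PORT B =====
-- B's inner 'while i < n and dirty_lines[i].strip() == "": i += 1'
def pvSkipBlanks : List String → List String
  | [] => []
  | l :: ls => if pvIsBlank l then pvSkipBlanks ls else l :: ls

theorem pvSkipBlanks_length_le (ls : List String) : (pvSkipBlanks ls).length ≤ ls.length := by
  induction ls with
  | nil => simp [pvSkipBlanks]
  | cons l ls ih => by_cases h : pvIsBlank l <;> simp [pvSkipBlanks, h] <;> omega

-- B's outer cursor loop: on a page break, skip blanks, then consume one line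
def pvGoB : List String → List String
  | [] => []
  | l :: ls =>
    if pvIsBreak l then
      match h : pvSkipBlanks ls with
      | [] => []
      | x :: rest => (if pvIsDocEnd x then [x] else []) ++ pvGoB rest
    else l :: pvGoB ls
termination_by xs => xs.length
decreasing_by
  · have := pvSkipBlanks_length_le ls
    rw [h] at this; simp at this ⊢; omega
  · simp

def remove_page_markings_alt (dirty_lines : List String) : List String :=
  pvGoB dirty_lines

-- ===== PRECONDITION & SPEC =====
def Spec_remove_page_markings (dirty_lines : List String) (out : List String) : Prop := out = remove_page_markings_alt dirty_lines
instance (dirty_lines : List String) (out : List String) : Decidable (Spec_remove_page_markings dirty_lines out) := by unfold Spec_remove_page_markings; infer_instance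

-- ===== CLAIM (what is proved, stated in full; the proofs are below) =====
def Claim_equal_remove_page_markings : Prop := ∀ (dirty_lines : List String), Dom_remove_page_markings dirty_lines → Spec_remove_page_markings dirty_lines (remove_page_markings dirty_lines)

-- ===== LEMMAS AND PROOFS =====

-- what A does from the flag=true state, phrased as B computes it
def pvPost (ls : List String) : List String :=
  match pvSkipBlanks ls with
  | [] => []
  | x :: rest => (if pvIsDocEnd x then [x] else []) ++ pvGoB rest

theorem pvGoB_nil : pvGoB [] = [] := by simp [pvGoB]

theorem pvGoB_cons (l : String) (ls : List String) :
    pvGoB (l :: ls) = if pvIsBreak l then pvPost ls else l :: pvGoB ls := by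
  by_cases hb : pvIsBreak l
  · rw [pvGoB.eq_def]
    simp only [hb, if_true, pvPost]
    cases hsb : pvSkipBlanks ls <;> rfl
  · rw [pvGoB.eq_def]; simp [hb]

theorem pvAuxA_eq (ls : List String) :
    (∀ acc, pvAuxA ls false acc = acc ++ pvGoB ls) ∧
    (∀ acc, pvAuxA ls true acc = acc ++ pvPost ls) := by
  induction ls with
  | nil => constructor <;> intro acc <;> simp [pvAuxA, pvGoB_nil, pvPost, pvSkipBlanks]
  | cons l ls ih =>
    obtain ⟨ihf, iht⟩ := ih
    constructor <;> intro acc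
    · rw [pvGoB_cons]
      by_cases hb : pvIsBreak l
      · simp [pvAuxA, hb, iht]
      · simp [pvAuxA, hb, ihf]
    · by_cases hbl : pvIsBlank l
      · simp [pvAuxA, hbl, iht, pvPost, pvSkipBlanks]
      · by_cases hd : pvIsDocEnd l
        · simp [pvAuxA, hbl, hd, ihf, pvPost, pvSkipBlanks]
        · simp [pvAuxA, hbl, hd, ihf, pvPost, pvSkipBlanks]

-- ===== VERDICT (by name: the statement is the Claim_ definition above) =====
theorem remove_page_markings_spec : Claim_equal_remove_page_markings := by
  intro dirty_lines _
  unfold Spec_remove_page_markings remove_page_markings remove_page_markings_alt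
  simpa using (pvAuxA_eq dirty_lines).1 []
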